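-- pv_equiv track=rewrite | github.com/Leclee/lecfaka | backend/app/api/v1/admin/plugins.py | _find_plugin_json_in_zip
-- ===== SOURCE A (Python) =====
-- from typing import Optional, Dict, Any
--
-- def _find_plugin_json_in_zip(names: list) -> Optional[str]:
--     """
--     @brief 在 zip 文件名列表中查找 plugin.json
--     @param names zip 内所有条目名称
--     @return plugin.json 的完整条目路径，未找到返回 None
--
--     优先返回层级最浅的 plugin.json
--     """
--     candidates = []
--     for n in names:
--         if n.endswith("/"):
--             continue
--         parts = n.replace("\\", "/").split("/")
--         if parts[-1] == "plugin.json":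
--             candidates.append((len(parts), n))
--
--     if not candidates:
--         return None
--
--     candidates.sort(key=lambda x: x[0])
--     return candidates[0][1]
-- ===== SOURCE B (Python) =====
-- from typing import Optional
--
--
-- def _depth_if_candidate(n: str) -> Optional[int]:
--     if n.endswith("/"):
--         return None
--     parts = n.replace("\\", "/").split("/")
--     return len(parts) if parts[-1] == "plugin.json" else None
--
--
-- def _find_plugin_json_in_zip(names: list) -> Optional[str]:
--     best_name = None
--     best_depth = None
--     for n in names:
--         d = _depth_if_candidate(n)
--         if d is not None and (best_depth is None or d < best_depth):
--             best_name, best_depth = n, d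
--     return best_name
-- ===== Notes on version B (the rewrite author's own statement) =====
-- stated objective: alternative
-- what changed: Replaced building a candidate list, sorting it by depth and taking its head with a single pass that keeps a running shallowest candidate (strict < preserves the first-tie winner of A's stable sort); per-name string work dominates, so the cost is similar.
import Mathlib
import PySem

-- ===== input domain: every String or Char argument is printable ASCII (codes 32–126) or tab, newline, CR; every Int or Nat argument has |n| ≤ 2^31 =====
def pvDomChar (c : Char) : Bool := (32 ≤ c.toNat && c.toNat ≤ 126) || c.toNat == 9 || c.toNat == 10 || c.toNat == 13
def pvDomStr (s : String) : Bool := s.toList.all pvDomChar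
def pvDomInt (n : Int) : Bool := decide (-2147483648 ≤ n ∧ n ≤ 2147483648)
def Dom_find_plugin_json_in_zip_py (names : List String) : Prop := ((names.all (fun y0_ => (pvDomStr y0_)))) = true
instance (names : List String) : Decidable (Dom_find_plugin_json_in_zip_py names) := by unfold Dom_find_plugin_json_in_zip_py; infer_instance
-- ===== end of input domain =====

-- B replaces A's build-sort-take-head with a single pass keeping the running shallowest
-- candidate (strict < preserves the first-tie winner of A's stable sort); similar cost.

-- ===== PORT A =====
-- one loop body of A: skip dir entries, split on '/', collect (len(parts), n) candidates
def pvStepA (acc : List (Nat × String)) (n : String) : List (Nat × String) :=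
  if PySem.Str.endswith n "/" then acc
  else
    match PySem.Str.split? (PySem.Str.replace n "\\" "/") "/" with
    | none => acc  -- unreachable: the separator "/" is nonempty
    | some parts =>
      if PySem.List.pyGet? parts (-1) = some "plugin.json" then acc ++ [(parts.length, n)]
      else acc

def find_plugin_json_in_zip_py (names : List String) : Option String :=
  let candidates := names.foldl pvStepA []
  if candidates.isEmpty then none
  else ((PySem.List.sorted candidates (fun c => c.1) false).head?).map (fun c => c.2)

-- ===== PORT B =====
-- helper of Source B: depth of a candidate entry, none if not a plugin.json file entry
def pvDepthIfCandidate (n : String) : Option Nat :=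
  if PySem.Str.endswith n "/" then none
  else
    match PySem.Str.split? (PySem.Str.replace n "\\" "/") "/" with
    | none => none  -- unreachable: the separator "/" is nonempty
    | some parts =>
      if PySem.List.pyGet? parts (-1) = some "plugin.json" then some parts.length else none

def find_plugin_json_in_zip_py_alt (names : List String) : Option String :=
  (names.foldl (fun best n =>
      match pvDepthIfCandidate n with
      | none => best
      | some d =>
        match best with
        | none => some (d, n)
        | some b => if d < b.1 then some (d, n) else best)
    none).map (fun b => b.2)

-- ===== PRECONDITION & SPEC =====
def Spec_find_plugin_json_in_zip_py (names : List String) (out : Option String) : Prop := out = find_plugin_json_in_zip_py_alt names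
instance (names : List String) (out : Option String) : Decidable (Spec_find_plugin_json_in_zip_py names out) := by unfold Spec_find_plugin_json_in_zip_py; infer_instance

-- ===== CLAIM (what is proved, stated in full; the proofs are below) =====
def Claim_equal_find_plugin_json_in_zip_py : Prop := ∀ (names : List String), Dom_find_plugin_json_in_zip_py names → Spec_find_plugin_json_in_zip_py names (find_plugin_json_in_zip_py names)

-- ===== LEMMAS AND PROOFS =====

-- the running-min step on candidates, shared shape of both sides after rewriting
def pvMinStep (best : Option (Nat × String)) (c : Nat × String) : Option (Nat × String) :=
  match best with
  | none => some c
  | some b => if c.1 < b.1 then some c else some b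

-- A's loop body expressed through B's candidate test
theorem pvStepA_eq (acc : List (Nat × String)) (n : String) :
    pvStepA acc n = match pvDepthIfCandidate n with
      | none => acc
      | some d => acc ++ [(d, n)] := by
  unfold pvStepA pvDepthIfCandidate
  split_ifs with h1
  · rfl
  · cases PySem.Str.split? (PySem.Str.replace n "\\" "/") "/" with
    | none => rfl
    | some parts => by_cases h : PySem.List.pyGet? parts (-1) = some "plugin.json" <;> simp [h]

-- A's candidate list is a filterMap of the names
theorem candidates_eq (names : List String) (acc : List (Nat × String)) :
    names.foldl pvStepA acc =
      acc ++ names.filterMap (fun n => (pvDepthIfCandidate n).map (fun d => (d, n))) := by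
  induction names generalizing acc with
  | nil => simp
  | cons n t ih =>
    simp only [List.foldl_cons, List.filterMap_cons, pvStepA_eq]
    cases h : pvDepthIfCandidate n <;> simp [ih]

-- B's fold over names is the running min over the candidate list
theorem altFold_eq (names : List String) (best : Option (Nat × String)) :
    names.foldl (fun best n =>
      match pvDepthIfCandidate n with
      | none => best
      | some d =>
        match best with
        | none => some (d, n)
        | some b => if d < b.1 then some (d, n) else best) best =
    (names.filterMap (fun n => (pvDepthIfCandidate n).map (fun d => (d, n)))).foldl pvMinStep best := by
  induction names generalizing best with
  | nil => rfl
  | cons n t ih =>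
    simp only [List.foldl_cons, List.filterMap_cons]
    cases h : pvDepthIfCandidate n with
    | none => simp [ih]
    | some d =>
      simp only [Option.map_some, List.foldl_cons, ih]
      cases best <;> rfl

-- head of an insertion step = running-min step
theorem head_insertBy (x : Nat × String) (acc : List (Nat × String)) :
    (PySem.List.insertBy (fun a b => decide (a.1 < b.1)) x acc).head? =
      pvMinStep acc.head? x := by
  cases acc with
  | nil => rfl
  | cons y ys =>
    simp only [PySem.List.insertBy, pvMinStep]
    by_cases h : x.1 < y.1 <;> simp [h]

-- head of the stable insertion sort's fold = running min
theorem head_foldl_insertBy (xs : List (Nat × String)) (acc : List (Nat × String)) :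
    ((xs.foldl (fun a c => PySem.List.insertBy (fun a b => decide (a.1 < b.1)) c a) acc).head?) =
      xs.foldl pvMinStep acc.head? := by
  induction xs generalizing acc with
  | nil => rfl
  | cons x t ih =>
    simp only [List.foldl_cons, ih, head_insertBy]

theorem head_sorted (xs : List (Nat × String)) :
    (PySem.List.sorted xs (fun c => c.1) false).head? = xs.foldl pvMinStep none := by
  rw [PySem.List.sorted_eq_foldl_insertBy]
  exact head_foldl_insertBy xs []

-- ===== VERDICT (by name: the statement is the Claim_ definition above) =====
theorem find_plugin_json_in_zip_py_spec : Claim_equal_find_plugin_json_in_zip_py := by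
  intro names _
  unfold Spec_find_plugin_json_in_zip_py find_plugin_json_in_zip_py find_plugin_json_in_zip_py_alt
  rw [altFold_eq]
  rw [candidates_eq names []]
  simp only [List.nil_append]
  set cs := names.filterMap (fun n => (pvDepthIfCandidate n).map (fun d => (d, n))) with hcs
  by_cases h : cs = []
  · simp [h]
  · simp only [List.isEmpty_iff, h, head_sorted, if_false, decide_false]
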